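-- pv_equiv track=rewrite | github.com/marcuscostagraciano/TCC-BSI | src/cPython/testingFunctions.py | amplitude
-- ===== SOURCE A (Python) =====
-- def amplitude(ndarray):
--     max_value = ndarray[0]
--     min_value = ndarray[0]
--
--     for number in ndarray:
--         if max_value < number:
--             max_value = number
--         if number < min_value:
--             min_value = number
--
--     return max_value - min_value
-- ===== SOURCE B (Python) =====
-- def amplitude(ndarray):
--     s = sorted(ndarray)
--     return s[-1] - s[0]
-- ===== Notes on version B (the rewrite author's own statement) =====
-- stated objective: simpler
-- what changed: Replaces the single-pass running max/min scan with sort-then-endpoints: sort once and subtract the first element from the last.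
import Mathlib
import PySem

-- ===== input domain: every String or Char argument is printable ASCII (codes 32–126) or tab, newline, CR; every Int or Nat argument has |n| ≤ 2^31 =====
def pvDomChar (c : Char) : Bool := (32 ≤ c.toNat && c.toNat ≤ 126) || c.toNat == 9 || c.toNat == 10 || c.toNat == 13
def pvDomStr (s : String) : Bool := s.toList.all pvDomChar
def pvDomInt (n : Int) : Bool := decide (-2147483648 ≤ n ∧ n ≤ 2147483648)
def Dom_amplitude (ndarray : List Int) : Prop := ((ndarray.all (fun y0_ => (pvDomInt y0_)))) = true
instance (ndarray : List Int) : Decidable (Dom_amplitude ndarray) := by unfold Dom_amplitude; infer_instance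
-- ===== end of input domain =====

-- B replaces A's single-pass running max/min scan with sort-then-endpoints (simpler; not faster).

-- ===== PORT A =====
-- amplitude: max_value = min_value = ndarray[0]; one pass updating both; return max - min.
def amplitude (ndarray : List Int) : Int :=
  match PySem.List.pyGet? ndarray 0 with
  | none => 0   -- unreachable under Pre_amplitude (Python raises IndexError on [])
  | some a0 =>
    let st := ndarray.foldl
      (fun (p : Int × Int) number =>
        let mx := if p.1 < number then number else p.1
        let mn := if number < p.2 then number else p.2
        (mx, mn)) (a0, a0)
    st.1 - st.2

-- ===== PORT B =====
-- Source B: s = sorted(ndarray); return s[-1] - s[0]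
def amplitude_alt (ndarray : List Int) : Int :=
  let s := PySem.List.sorted ndarray (fun x => x) false
  match PySem.List.pyGet? s (-1), PySem.List.pyGet? s 0 with
  | some hi, some lo => hi - lo
  | _, _ => 0   -- unreachable under Pre_amplitude (Python raises IndexError on [])

-- ===== PRECONDITION & SPEC =====
-- Pre_ excludes only the empty list, on which the Python A raises IndexError.
def Pre_amplitude (ndarray : List Int) : Prop := ndarray ≠ []
instance (ndarray : List Int) : Decidable (Pre_amplitude ndarray) := by unfold Pre_amplitude; infer_instance
def pvWitness_amplitude : List Int := [3, -1, 4, 1]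

def Spec_amplitude (ndarray : List Int) (out : Int) : Prop := out = amplitude_alt ndarray
instance (ndarray : List Int) (out : Int) : Decidable (Spec_amplitude ndarray out) := by unfold Spec_amplitude; infer_instance

-- ===== CLAIM (what is proved, stated in full; the proofs are below) =====
def Claim_equal_amplitude : Prop := ∀ (ndarray : List Int), Dom_amplitude ndarray → Pre_amplitude ndarray → Spec_amplitude ndarray (amplitude ndarray)

-- ===== LEMMAS AND PROOFS =====

-- A's fold step is (max, min) componentwise.
theorem amp_foldl_eq (l : List Int) (p : Int × Int) :
    l.foldl (fun (p : Int × Int) number =>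
        let mx := if p.1 < number then number else p.1
        let mn := if number < p.2 then number else p.2
        (mx, mn)) p
      = (l.foldl max p.1, l.foldl min p.2) := by
  induction l generalizing p with
  | nil => rfl
  | cons x t ih =>
    have h1 : (if p.1 < x then x else p.1) = max p.1 x := by split_ifs <;> omega
    have h2 : (if x < p.2 then x else p.2) = min p.2 x := by split_ifs <;> omega
    simp [List.foldl_cons, ih, h1, h2]

theorem foldl_max_mem (l : List Int) (b : Int) : l.foldl max b ∈ b :: l := by
  induction l generalizing b with
  | nil => simp
  | cons x t ih =>
    have h := ih (max b x)
    rw [List.foldl_cons]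
    rcases List.mem_cons.1 h with h | h
    · rw [h]; rcases max_choice b x with h' | h' <;> rw [h'] <;> simp
    · exact List.mem_cons_of_mem _ (List.mem_cons_of_mem _ h)

theorem le_foldl_max (l : List Int) (b : Int) : b ≤ l.foldl max b ∧ ∀ y ∈ l, y ≤ l.foldl max b := by
  induction l generalizing b with
  | nil => simp
  | cons x t ih =>
    obtain ⟨h1, h2⟩ := ih (max b x)
    refine ⟨le_trans (le_max_left _ _) h1, ?_⟩
    intro y hy
    rcases List.mem_cons.1 hy with rfl | hy
    · exact le_trans (le_max_right _ _) h1
    · exact h2 y hy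

theorem foldl_min_mem (l : List Int) (b : Int) : l.foldl min b ∈ b :: l := by
  induction l generalizing b with
  | nil => simp
  | cons x t ih =>
    have h := ih (min b x)
    rw [List.foldl_cons]
    rcases List.mem_cons.1 h with h | h
    · rw [h]; rcases min_choice b x with h' | h' <;> rw [h'] <;> simp
    · exact List.mem_cons_of_mem _ (List.mem_cons_of_mem _ h)

theorem foldl_min_le (l : List Int) (b : Int) : l.foldl min b ≤ b ∧ ∀ y ∈ l, l.foldl min b ≤ y := by
  induction l generalizing b with
  | nil => simp
  | cons x t ih =>
    obtain ⟨h1, h2⟩ := ih (min b x)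
    refine ⟨le_trans h1 (min_le_left _ _), ?_⟩
    intro y hy
    rcases List.mem_cons.1 hy with rfl | hy
    · exact le_trans h1 (min_le_right _ _)
    · exact h2 y hy

theorem pairwise_le_getLast? (s : List Int) (hp : s.Pairwise (· ≤ ·)) :
    ∀ y ∈ s, ∀ z, s.getLast? = some z → y ≤ z := by
  induction s with
  | nil => simp
  | cons x t ih =>
    intro y hy z hz
    cases t with
    | nil =>
      simp only [List.mem_cons, List.not_mem_nil, or_false] at hy
      simp only [List.getLast?_singleton, Option.some.injEq] at hz
      omega
    | cons w v =>
      have hlast : (w :: v).getLast? = some z := by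
        simpa [List.getLast?_cons_cons] using hz
      rcases List.mem_cons.1 hy with rfl | hy'
      · have hall := (List.pairwise_cons.1 hp).1
        have hzl : (w :: v).getLast? = some ((w :: v).getLast (by simp)) :=
          List.getLast?_eq_some_getLast (by simp)
        rw [hzl] at hlast
        injection hlast with h
        exact h ▸ hall _ (List.getLast_mem _)
      · exact ih (List.pairwise_cons.1 hp).2 y hy' z hlast

-- ===== VERDICT (by name: the statement is the Claim_ definition above) =====
theorem amplitude_spec : Claim_equal_amplitude := by
  intro ndarray _ hpre
  obtain ⟨a0, t, rfl⟩ := List.exists_cons_of_ne_nil hpre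
  set l := a0 :: t with hl
  set s := PySem.List.sorted l (fun x => x) false with hs
  have hsne : s ≠ [] := by
    intro h0
    exact hpre ((PySem.List.sorted_eq_nil_iff _ _ _).1 (hs ▸ h0))
  obtain ⟨m, u, hmu⟩ := List.exists_cons_of_ne_nil hsne
  have hmu' : PySem.List.sorted l (fun x => x) false = m :: u := by rw [← hs]; exact hmu
  have hperm : s.Perm l := by rw [hs]; exact PySem.List.sorted_perm ..
  have hpair : s.Pairwise (· ≤ ·) := by
    rw [hs]
    have := PySem.List.sorted_pairwise (xs := l) (key := fun x : Int => x)
    simpa using this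
  set hi := s.getLast hsne with hhi
  have hgl : s.getLast? = some hi := List.getLast?_eq_some_getLast hsne
  show amplitude l = amplitude_alt l
  have hA : amplitude l = l.foldl max a0 - l.foldl min a0 := by
    simp only [amplitude, hl, PySem.List.pyGet?_zero_cons, amp_foldl_eq]
  have hB : amplitude_alt l = hi - m := by
    simp only [amplitude_alt]
    rw [← hs, PySem.List.pyGet?_neg_one, hgl, hmu, PySem.List.pyGet?_zero_cons]
  rw [hA, hB]
  -- max side
  have hmaxmem : l.foldl max a0 ∈ l := by
    have := foldl_max_mem l a0
    rcases List.mem_cons.1 this with h | h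
    · rw [h, hl]; simp
    · exact h
  have hmaxub : ∀ y ∈ l, y ≤ l.foldl max a0 := (le_foldl_max l a0).2
  have hlastmem : hi ∈ l := hperm.mem_iff.1 (hhi ▸ List.getLast_mem hsne)
  have hlastub : ∀ y ∈ l, y ≤ hi := fun y hy =>
    pairwise_le_getLast? s hpair y (hperm.mem_iff.2 hy) hi hgl
  have hmaxeq : l.foldl max a0 = hi :=
    le_antisymm (hlastub _ hmaxmem) (hmaxub _ hlastmem)
  -- min side
  have hminmem : l.foldl min a0 ∈ l := by
    have := foldl_min_mem l a0
    rcases List.mem_cons.1 this with h | h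
    · rw [h, hl]; simp
    · exact h
  have hminlb : ∀ y ∈ l, l.foldl min a0 ≤ y := (foldl_min_le l a0).2
  have hmmem : m ∈ l := hperm.mem_iff.1 (by rw [hmu]; simp)
  have hmlb : ∀ y ∈ l, m ≤ y := by
    intro y hy
    have := PySem.List.key_head_sorted_le l (fun x : Int => x) hmu' y hy
    simpa using this
  have hmineq : l.foldl min a0 = m :=
    le_antisymm (hminlb _ hmmem) (hmlb _ hminmem)
  rw [hmaxeq, hmineq]
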